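-- pv_equiv track=rewrite | github.com/GoldenMillet/astrbot_plugin_iie_useful_utils | utils/T03_random_wife.py | T03_msg_statistics
-- ===== SOURCE A (Python) =====
-- def T03_msg_statistics(msg_statistics_list: list, sender_id: str, sender_name: str) -> list:
--     if all(sender_id != item[0] for item in msg_statistics_list):
--         tuple_temp: tuple[str, str, int] = (sender_id, sender_name, 1)
--         msg_statistics_list.append(tuple_temp)
--     else:
--         for i, item in enumerate(msg_statistics_list):
--             if item[0] == sender_id:
--                 # 构造新元组替换原来的
--                 msg_statistics_list[i] = (item[0], sender_name, item[2] + 1)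
--
--     return msg_statistics_list
-- ===== SOURCE B (Python) =====
-- def T03_msg_statistics(msg_statistics_list: list, sender_id: str, sender_name: str) -> list:
--     # Single pass with a found flag instead of A's separate all(...) scan + update loop.
--     out = []
--     found = False
--     for item in msg_statistics_list:
--         if item[0] == sender_id:
--             out.append((item[0], sender_name, item[2] + 1))
--             found = True
--         else:
--             out.append(item)
--     if not found:
--         out.append((sender_id, sender_name, 1))
--     msg_statistics_list[:] = out  # preserve A's in-place mutation
--     return msg_statistics_list
-- ===== Notes on version B (the rewrite author's own statement) =====
-- stated objective: simpler
-- what changed: Replaces A's two-pass structure (an all(...) existence scan followed by a separate enumerate/update loop) with one single traversal that rewrites matching slots and tracks a found flag, appending the new entry only if the flag stayed false.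
import Mathlib
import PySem

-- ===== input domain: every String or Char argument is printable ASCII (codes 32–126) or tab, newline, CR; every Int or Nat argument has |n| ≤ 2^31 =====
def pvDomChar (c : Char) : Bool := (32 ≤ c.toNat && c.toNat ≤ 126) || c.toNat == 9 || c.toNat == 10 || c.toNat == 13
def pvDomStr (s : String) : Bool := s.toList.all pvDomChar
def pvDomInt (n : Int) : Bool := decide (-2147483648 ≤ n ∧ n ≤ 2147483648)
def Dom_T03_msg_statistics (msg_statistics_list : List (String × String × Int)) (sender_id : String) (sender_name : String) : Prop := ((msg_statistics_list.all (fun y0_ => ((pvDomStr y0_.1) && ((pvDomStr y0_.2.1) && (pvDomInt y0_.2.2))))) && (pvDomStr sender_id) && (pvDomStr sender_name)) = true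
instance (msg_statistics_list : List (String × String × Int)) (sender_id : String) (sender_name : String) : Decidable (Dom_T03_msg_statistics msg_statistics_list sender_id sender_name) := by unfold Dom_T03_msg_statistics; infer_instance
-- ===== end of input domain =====

-- B merges A's two passes (all(...) existence scan + separate update loop) into one traversal with
-- a found flag; return-value equivalence only: the Python A mutates the list in place (B mirrors
-- this with a slice assignment).

-- ===== PORT A =====
-- A: if no entry matches, append (sid, name, 1); else rewrite every matching slot in place
-- (the enumerate loop assigning msg_statistics_list[i] is rendered as a positional map).
def T03_msg_statistics (msg_statistics_list : List (String × String × Int)) (sender_id : String) (sender_name : String) : List (String × String × Int) :=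
  if msg_statistics_list.all (fun item => !(sender_id == item.1)) then
    msg_statistics_list ++ [(sender_id, sender_name, 1)]
  else
    msg_statistics_list.map (fun item =>
      if item.1 == sender_id then (item.1, sender_name, item.2.2 + 1) else item)

-- ===== PORT B =====
-- B: one fold carrying (output so far, found flag); append the fresh entry only if found is false.
def T03_msg_statistics_alt (msg_statistics_list : List (String × String × Int)) (sender_id : String) (sender_name : String) : List (String × String × Int) :=
  let r := msg_statistics_list.foldl
    (fun (acc : List (String × String × Int) × Bool) item =>
      if item.1 == sender_id then (acc.1 ++ [(item.1, sender_name, item.2.2 + 1)], true)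
      else (acc.1 ++ [item], acc.2))
    ([], false)
  if r.2 then r.1 else r.1 ++ [(sender_id, sender_name, 1)]

-- ===== PRECONDITION & SPEC =====
def Spec_T03_msg_statistics (msg_statistics_list : List (String × String × Int)) (sender_id : String) (sender_name : String) (out : List (String × String × Int)) : Prop := out = T03_msg_statistics_alt msg_statistics_list sender_id sender_name
instance (msg_statistics_list : List (String × String × Int)) (sender_id : String) (sender_name : String) (out : List (String × String × Int)) : Decidable (Spec_T03_msg_statistics msg_statistics_list sender_id sender_name out) := by unfold Spec_T03_msg_statistics; infer_instance

-- ===== CLAIM (what is proved, stated in full; the proofs are below) =====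
def Claim_equal_T03_msg_statistics : Prop := ∀ (msg_statistics_list : List (String × String × Int)) (sender_id : String) (sender_name : String), Dom_T03_msg_statistics msg_statistics_list sender_id sender_name → Spec_T03_msg_statistics msg_statistics_list sender_id sender_name (T03_msg_statistics msg_statistics_list sender_id sender_name)

-- ===== LEMMAS AND PROOFS =====

-- B's fold equals (prefix ++ updated list, flag OR "some element matches").
theorem pv_fold_char (sender_id sender_name : String)
    (l : List (String × String × Int)) (acc : List (String × String × Int)) (b : Bool) :
    l.foldl
      (fun (acc : List (String × String × Int) × Bool) item =>
        if item.1 == sender_id then (acc.1 ++ [(item.1, sender_name, item.2.2 + 1)], true)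
        else (acc.1 ++ [item], acc.2))
      (acc, b)
    = (acc ++ l.map (fun item =>
        if item.1 == sender_id then (item.1, sender_name, item.2.2 + 1) else item),
       b || l.any (fun item => item.1 == sender_id)) := by
  induction l generalizing acc b with
  | nil => simp
  | cons h t ih =>
    by_cases hm : h.1 == sender_id
    · simp only [List.foldl_cons, hm, if_true, ih, List.map_cons, List.any_cons,
        Bool.or_true, List.append_assoc, List.singleton_append]
      simp
    · simp only [List.foldl_cons, hm, if_false, Bool.false_eq_true, ih, List.map_cons,
        List.any_cons, Bool.false_or, List.append_assoc, List.singleton_append]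

-- When no element matches, the positional update leaves the list unchanged.
theorem pv_map_id (sender_id sender_name : String) (l : List (String × String × Int))
    (h : l.all (fun item => !(sender_id == item.1)) = true) :
    l.map (fun item =>
      if item.1 == sender_id then (item.1, sender_name, item.2.2 + 1) else item) = l := by
  induction l with
  | nil => rfl
  | cons x t ih =>
    simp only [List.all_cons, Bool.and_eq_true] at h
    have hx : x.1 ≠ sender_id := by
      rcases h with ⟨h1, _⟩
      simp only [Bool.not_eq_eq_eq_not, Bool.not_true, beq_eq_false_iff_ne] at h1
      exact fun hc => h1 hc.symm
    rw [List.map_cons, if_neg (by simpa using hx), ih h.2]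

-- ===== VERDICT (by name: the statement is the Claim_ definition above) =====
theorem T03_msg_statistics_spec : Claim_equal_T03_msg_statistics := by
  intro l sid sn _
  unfold Spec_T03_msg_statistics T03_msg_statistics T03_msg_statistics_alt
  rw [pv_fold_char]
  by_cases hall : l.all (fun item => !(sid == item.1)) = true
  · have hany : l.any (fun item => item.1 == sid) = false := by
      cases hc : l.any (fun item => item.1 == sid) with
      | false => rfl
      | true =>
        simp only [List.any_eq_true] at hc
        rcases hc with ⟨x, hx, hxe⟩
        simp only [List.all_eq_true] at hall
        have := hall x hx
        simp [beq_iff_eq] at hxe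
        simp [hxe] at this
    simp only [hall, if_true, hany, Bool.false_or, Bool.false_eq_true, if_false,
      List.nil_append]
    rw [pv_map_id sid sn l hall]
  · have hany : l.any (fun item => item.1 == sid) = true := by
      simp only [List.all_eq_true, not_forall] at hall
      rcases hall with ⟨x, hx, hne⟩
      simp only [List.any_eq_true]
      refine ⟨x, hx, ?_⟩
      simp at hne ⊢
      exact hne.symm
    simp [hall, hany]
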